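-- pv_equiv track=rewrite | github.com/calvinosinga/hcolor | hicc_library/plots/figures.py | _fetchKeys
-- ===== SOURCE A (Python) =====
-- def _fetchKeys(substrings, keylist):
--     res = []
--     for sub in substrings:
--         for k in keylist:
--             if sub in k and not k in res:
--                 res.append(k)
--
--     if 'k' in res:
--         res.remove('k')
--     return res
-- ===== SOURCE B (Python) =====
-- def _fetchKeys(substrings, keylist):
--     # decorate-sort-undecorate: rank each distinct key by (first matching substring
--     # position, first occurrence position) and sort, instead of nested scans with
--     # an inline seen-list membership test.
--     dec = []
--     for i, k in enumerate(dict.fromkeys(keylist)):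
--         for j, s in enumerate(substrings):
--             if s in k:
--                 dec.append((j, i, k))
--                 break
--     res = [k for (j, i, k) in sorted(dec, key=lambda t: (t[0], t[1]))]
--     if 'k' in res:
--         res.remove('k')
--     return res
-- ===== Notes on version B (the rewrite author's own statement) =====
-- stated objective: faster
-- what changed: A does a substring-major nested scan that appends a key unless an inline 'not in res' list scan has seen it; B inverts the traversal to key-major over the deduplicated keylist, decorates each matching key with the rank pair (first matching substring index, first occurrence index), and obtains the output order by sorting on that pair (decorate-sort-undecorate), so the quadratic seen-list scan disappears.
import Mathlib
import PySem

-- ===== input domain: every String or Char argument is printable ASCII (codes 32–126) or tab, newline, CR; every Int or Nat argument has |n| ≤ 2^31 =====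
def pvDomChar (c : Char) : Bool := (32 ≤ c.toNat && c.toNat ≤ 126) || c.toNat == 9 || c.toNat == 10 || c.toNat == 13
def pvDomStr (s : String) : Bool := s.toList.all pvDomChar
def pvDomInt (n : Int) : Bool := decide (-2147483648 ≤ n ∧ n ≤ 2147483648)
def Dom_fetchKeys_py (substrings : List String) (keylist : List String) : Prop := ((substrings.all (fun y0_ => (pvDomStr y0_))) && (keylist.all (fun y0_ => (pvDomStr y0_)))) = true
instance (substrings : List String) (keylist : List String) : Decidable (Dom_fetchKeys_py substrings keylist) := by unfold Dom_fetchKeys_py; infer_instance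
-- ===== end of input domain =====

-- B replaces A's substring-major nested scan with its inline seen-list membership test by a
-- key-major decorate-sort-undecorate pass over the deduplicated keylist (measured faster).

-- ===== PORT A =====
def fetchKeys_py (substrings : List String) (keylist : List String) : List String :=
  let res := substrings.foldl (fun res sub =>
    keylist.foldl (fun res k =>
      if PySem.Str.isIn sub k && !(res.contains k) then res ++ [k] else res) res) []
  if res.contains "k" then (PySem.List.remove? res "k").getD res else res

-- ===== PORT B =====
def fetchKeys_py_alt (substrings : List String) (keylist : List String) : List String :=
  let dec := (PySem.List.enumerate (PySem.List.dedup keylist)).foldl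
    (fun dec p =>
      match (PySem.List.enumerate substrings).find? (fun q => PySem.Str.isIn q.2 p.2) with
      | some q => dec ++ [(q.1, p.1, p.2)]
      | none => dec) ([] : List (Int × Int × String))
  let res := (PySem.List.sorted2 dec (fun t => t.1) (fun t => t.2.1)).map (fun t => t.2.2)
  if res.contains "k" then (PySem.List.remove? res "k").getD res else res

-- ===== PRECONDITION & SPEC =====
def Spec_fetchKeys_py (substrings : List String) (keylist : List String) (out : List String) : Prop := out = fetchKeys_py_alt substrings keylist
instance (substrings : List String) (keylist : List String) (out : List String) : Decidable (Spec_fetchKeys_py substrings keylist out) := by unfold Spec_fetchKeys_py; infer_instance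

-- ===== CLAIM =====
def Claim_equal_fetchKeys_py : Prop := ∀ (substrings : List String) (keylist : List String), Dom_fetchKeys_py substrings keylist → Spec_fetchKeys_py substrings keylist (fetchKeys_py substrings keylist)

-- ===== LEMMAS AND PROOFS =====

-- index of the first substring of ss contained in k (0 if none)
def jrk : List String → String → Int
  | [], _ => 0
  | a :: t, k => if PySem.Str.isIn a k then 0 else jrk t k + 1

-- index of the first occurrence of k in l (0 if absent)
def irk : List String → String → Int
  | [], _ => 0
  | a :: t, k => if a = k then 0 else irk t k + 1

theorem jrk_nonneg (ss : List String) (k : String) : 0 ≤ jrk ss k := by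
  induction ss with
  | nil => simp [jrk]
  | cons a t ih => simp only [jrk]; split <;> omega

theorem irk_cons_of_ne (a k : String) (t : List String) (h : a ≠ k) :
    irk (a :: t) k = irk t k + 1 := by simp [irk, h]

theorem irk_getElem (l : List String) (hl : l.Nodup) (i : Nat) (h : i < l.length) :
    irk l l[i] = i := by
  induction l generalizing i with
  | nil => simp at h
  | cons a t ih =>
    rcases List.nodup_cons.mp hl with ⟨hat, hnd⟩
    cases i with
    | zero => simp [irk]
    | succ n =>
      have hn : n < t.length := by simpa using h
      have hmem : t[n] ∈ t := List.getElem_mem _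
      have hne : a ≠ t[n] := by intro he; exact hat (he ▸ hmem)
      have : (a :: t)[n + 1] = t[n] := by simp
      rw [this, irk_cons_of_ne _ _ _ hne, ih hnd n hn]
      omega

theorem pairwise_irk (l : List String) (hl : l.Nodup) :
    l.Pairwise (fun a b => irk l a < irk l b) := by
  rw [List.pairwise_iff_getElem]
  intro i j hi hj hij
  rw [irk_getElem l hl i hi, irk_getElem l hl j hj]
  exact_mod_cast hij

-- A's inner loop over keylist is a Set.update with the matching keys
theorem fetchKeys_inner (sub : String) (keylist : List String) (res : List String) :
    keylist.foldl (fun res k =>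
      if PySem.Str.isIn sub k && !(res.contains k) then res ++ [k] else res) res
      = PySem.Set.update res (keylist.filter (fun k => PySem.Str.isIn sub k)) := by
  induction keylist generalizing res with
  | nil => rfl
  | cons k t ih =>
    simp only [List.foldl_cons, List.filter_cons]
    by_cases h : PySem.Str.isIn sub k = true <;>
      by_cases hc : res.contains k = true <;>
        simp only [h, hc, Bool.not_true, Bool.not_false, Bool.and_true, Bool.and_false,
          if_true, if_false, ih, Bool.false_eq_true] <;>
        simp only [List.contains_iff_mem] at hc <;>
        simp [PySem.Set.update, PySem.Set.add, PySem.Set.contains, hc]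

-- A's outer loop accumulates Set.updates of the concatenated match lists
theorem fetchKeys_outer (substrings : List String) (f : String → List String) (s : List String) :
    substrings.foldl (fun r sub => PySem.Set.update r (f sub)) s
      = PySem.Set.update s (substrings.flatMap f) := by
  induction substrings generalizing s with
  | nil => rfl
  | cons a t ih =>
    rw [List.foldl_cons, ih, List.flatMap_cons]
    simp [PySem.Set.update, List.foldl_append]

-- the first match found through enumerate is the jrk-th substring
theorem find?_enum (ss : List String) (k : String) (s : Int) :
    ((PySem.List.enumerate ss s).find? (fun q => PySem.Str.isIn q.2 k)).map (·.1)
      = if ss.any (fun x => PySem.Str.isIn x k) then some (s + jrk ss k) else none := by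
  induction ss generalizing s with
  | nil => simp [PySem.List.enumerate_nil]
  | cons a t ih =>
    rw [PySem.List.enumerate_cons, List.find?_cons]
    by_cases h : PySem.Chars.isIn a.toList k.toList = true
    · simp [h, jrk, PySem.Str.isIn]
    · simp only [PySem.Str.isIn] at ih ⊢
      simp only [jrk, h, List.any_cons, Bool.false_eq_true, Bool.false_or, if_false,
        PySem.Str.isIn]
      rw [ih (s + 1)]
      by_cases ht : (t.any fun x => PySem.Chars.isIn x.toList k.toList) = true
      · rw [if_pos ht, if_pos ht]
        have : s + 1 + jrk t k = s + (jrk t k + 1) := by omega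
        rw [this]
      · rw [if_neg ht, if_neg ht]

-- B's collection loop, characterised: the matching keys of the Nodup list l, decorated
theorem dec_loop (substrings : List String) (l : List String) (hl : l.Nodup) (s : Int)
    (acc : List (Int × Int × String)) :
    (PySem.List.enumerate l s).foldl
      (fun dec p =>
        match (PySem.List.enumerate substrings).find? (fun q => PySem.Str.isIn q.2 p.2) with
        | some q => dec ++ [(q.1, p.1, p.2)]
        | none => dec) acc
      = acc ++ (l.filter (fun k => substrings.any (fun x => PySem.Str.isIn x k))).map
          (fun k => (jrk substrings k, s + irk l k, k)) := by
  induction l generalizing s acc with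
  | nil => simp [PySem.List.enumerate_nil]
  | cons x t ih =>
    rcases List.nodup_cons.mp hl with ⟨hxt, hnd⟩
    rw [PySem.List.enumerate_cons, List.foldl_cons]
    have hcongr : ((t.filter (fun k => substrings.any (fun x => PySem.Str.isIn x k))).map
          (fun k => (jrk substrings k, (s + 1) + irk t k, k)))
        = ((t.filter (fun k => substrings.any (fun x => PySem.Str.isIn x k))).map
          (fun k => (jrk substrings k, s + irk (x :: t) k, k))) := by
      apply List.map_congr_left
      intro k hk
      have hkt : k ∈ t := (List.mem_filter.mp hk).1
      have hne : x ≠ k := by intro he; exact hxt (he ▸ hkt)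
      rw [irk_cons_of_ne _ _ _ hne]
      have : s + 1 + irk t k = s + (irk t k + 1) := by omega
      rw [this]
    have hfind := find?_enum substrings x 0
    by_cases hm : (substrings.any fun y => PySem.Str.isIn y x) = true
    · rw [if_pos hm] at hfind
      rcases Option.map_eq_some_iff.mp hfind with ⟨q, hq, hq1⟩
      rw [hq]
      dsimp only
      rw [ih hnd (s + 1), hcongr]
      simp only [List.filter_cons, hm, if_true, List.map_cons]
      have hx0 : (q.1, s, x) = (jrk substrings x, s + irk (x :: t) x, x) := by
        simp [irk, hq1]
      rw [hx0, List.append_assoc]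
      rfl
    · rw [if_neg hm] at hfind
      have hnone : (PySem.List.enumerate substrings).find? (fun q => PySem.Str.isIn q.2 x) = none :=
        Option.map_eq_none_iff.mp hfind
      rw [hnone]
      rw [ih hnd (s + 1), hcongr]
      have hmf : (substrings.any fun y => PySem.Str.isIn y x) = false := by
        simpa using hm
      simp only [List.filter_cons, hmf, Bool.false_eq_true, if_false]

-- dedup commutes with filter
theorem dedup_filter (p : String → Bool) (xs : List String) :
    PySem.Set.ofList (xs.filter p) = (PySem.Set.ofList xs).filter p := by
  induction xs with
  | nil => rfl
  | cons x t ih =>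
    by_cases h : p x = true
    · rw [List.filter_cons_of_pos h, PySem.Set.ofList_cons, PySem.Set.ofList_cons, ih,
        List.filter_cons_of_pos h]
      simp only [PySem.Set.discard, List.filter_filter]
      exact congrArg _ (List.filter_congr (fun a _ => by rw [Bool.and_comm]))
    · rw [List.filter_cons_of_neg h, PySem.Set.ofList_cons, ih, List.filter_cons_of_neg h]
      simp only [PySem.Set.discard, List.filter_filter]
      apply List.filter_congr
      intro a _
      by_cases hax : (a == x) = true
      · have : a = x := by simpa using hax
        simp [this, h]
      · simp [hax]

-- the dedup'd match list is ordered lexicographically by (jrk, irk)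
theorem L_pairwise (ss keylist : List String) :
    (PySem.List.dedup (ss.flatMap (fun sub => keylist.filter (fun k => PySem.Str.isIn sub k)))).Pairwise
      (fun a b => jrk ss a < jrk ss b ∨
        (jrk ss a = jrk ss b ∧ irk (PySem.List.dedup keylist) a < irk (PySem.List.dedup keylist) b)) := by
  induction ss with
  | nil => simp [PySem.List.dedup]
  | cons sub t ih =>
    rw [List.flatMap_cons]
    simp only [PySem.List.dedup_eq_ofList] at *
    rw [PySem.Set.ofList_append, PySem.Set.update_eq_append_filter, List.pairwise_append]
    have notin : ∀ c : String,
        c ∈ (PySem.Set.ofList (t.flatMap fun su => keylist.filter fun k => PySem.Str.isIn su k)).filter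
            (fun y => !(PySem.Set.ofList (keylist.filter (fun k => PySem.Str.isIn sub k))).contains y) →
        PySem.Chars.isIn sub.toList c.toList = false := by
      intro c hc
      rcases List.mem_filter.mp hc with ⟨hmem, hnc⟩
      have hck : c ∈ keylist := by
        rcases List.mem_flatMap.mp ((PySem.Set.mem_ofList _ _).mp hmem) with ⟨su, _, hf⟩
        exact (List.mem_filter.mp hf).1
      by_contra hin
      rw [Bool.not_eq_false] at hin
      have hcmem : c ∈ PySem.Set.ofList (keylist.filter (fun k => PySem.Str.isIn sub k)) :=
        (PySem.Set.mem_ofList _ _).mpr (List.mem_filter.mpr ⟨hck, by simpa [PySem.Str.isIn] using hin⟩)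
      simp at hnc
      rcases hnc with h | h
      · exact h hck
      · simp [h] at hin
    refine ⟨?_, ?_, ?_⟩
    · rw [dedup_filter]
      have h2 := pairwise_irk (PySem.Set.ofList keylist) (PySem.Set.nodup_ofList keylist)
      apply List.Pairwise.imp_of_mem ?_ (h2.sublist List.filter_sublist)
      intro a b ha hb hlt
      have ha2 : PySem.Chars.isIn sub.toList a.toList = true := by
        simpa [PySem.Str.isIn] using (List.mem_filter.mp ha).2
      have hb2 : PySem.Chars.isIn sub.toList b.toList = true := by
        simpa [PySem.Str.isIn] using (List.mem_filter.mp hb).2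
      right
      refine ⟨?_, hlt⟩
      simp [jrk, PySem.Str.isIn, ha2, hb2]
    · apply List.Pairwise.imp_of_mem ?_ (ih.sublist List.filter_sublist)
      intro a b ha hb hlt
      have hna := notin a ha
      have hnb := notin b hb
      simp only [jrk, PySem.Str.isIn, hna, hnb, Bool.false_eq_true, if_false]
      rcases hlt with h | ⟨h1, h2⟩
      · left; omega
      · right; exact ⟨by omega, h2⟩
    · intro a ha b hb
      rw [dedup_filter] at ha
      have ha2 : PySem.Chars.isIn sub.toList a.toList = true := by
        simpa [PySem.Str.isIn] using (List.mem_filter.mp ha).2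
      have hnb := notin b hb
      left
      have hj := jrk_nonneg t b
      simp only [jrk, PySem.Str.isIn, ha2, hnb, Bool.false_eq_true, if_false, if_true]
      omega

-- the matching keys of the dedup'd keylist are a permutation of the dedup'd match list
theorem M_perm (substrings keylist : List String) :
    ((PySem.List.dedup keylist).filter (fun k => substrings.any fun x => PySem.Str.isIn x k)).Perm
      (PySem.List.dedup (substrings.flatMap (fun sub => keylist.filter (fun k => PySem.Str.isIn sub k)))) := by
  rw [List.perm_ext_iff_of_nodup ((PySem.List.nodup_dedup keylist).filter _)
    (PySem.List.nodup_dedup _)]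
  intro a
  simp only [List.mem_filter, PySem.List.mem_dedup, List.mem_flatMap, List.any_eq_true]
  constructor
  · rintro ⟨hk, x, hx, hin⟩
    exact ⟨x, hx, hk, hin⟩
  · rintro ⟨x, hx, hk, hin⟩
    exact ⟨hk, x, hx, hin⟩

-- Python's 2-component tuple comparison is the lexicographic order
theorem lex_decide (a1 a2 b1 b2 : Int) :
    (decide (a1 < b1) || (!decide (b1 < a1) && decide (a2 < b2)))
      = decide (toLex (a1, a2) < toLex (b1, b2)) := by
  by_cases h1 : a1 < b1 <;> by_cases h2 : b1 < a1 <;> by_cases h3 : a2 < b2 <;>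
    simp [h1, h2, h3, Prod.Lex.lt_iff] <;> omega

-- sorted2 on Int keys is sorted with the lexicographic key
theorem sorted2_lex (xs : List (Int × Int × String)) :
    PySem.List.sorted2 xs (fun t => t.1) (fun t => t.2.1)
      = PySem.List.sorted xs (fun t => toLex (t.1, t.2.1)) := by
  rw [PySem.List.sorted_eq_foldl_insertBy]
  simp only [PySem.List.sorted2, Bool.false_eq_true, if_false]
  congr 1
  funext acc x
  congr 1
  funext a b
  exact lex_decide a.1 a.2.1 b.1 b.2.1

-- the two core lists agree
theorem core_eq (substrings keylist : List String) :
    ((PySem.List.sorted2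
        ((PySem.List.enumerate (PySem.List.dedup keylist)).foldl
          (fun dec p =>
            match (PySem.List.enumerate substrings).find? (fun q => PySem.Str.isIn q.2 p.2) with
            | some q => dec ++ [(q.1, p.1, p.2)]
            | none => dec) ([] : List (Int × Int × String)))
        (fun t => t.1) (fun t => t.2.1)).map (fun t => t.2.2))
      = PySem.List.dedup (substrings.flatMap fun sub => keylist.filter fun k => PySem.Str.isIn sub k) := by
  rw [dec_loop substrings _ (PySem.List.nodup_dedup keylist) 0 []]
  simp only [List.nil_append, zero_add]
  rw [sorted2_lex]
  have hperm : ((PySem.List.dedup (substrings.flatMap fun sub =>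
        keylist.filter fun k => PySem.Str.isIn sub k)).map
        (fun k => (jrk substrings k, irk (PySem.List.dedup keylist) k, k))).Perm
      (((PySem.List.dedup keylist).filter (fun k => substrings.any fun x => PySem.Str.isIn x k)).map
        (fun k => (jrk substrings k, irk (PySem.List.dedup keylist) k, k))) :=
    ((M_perm substrings keylist).symm).map _
  rw [PySem.List.sorted_eq_of_perm_of_pairwise_lt _ _ _ hperm ?hp]
  · simp [List.map_map, Function.comp_def]
  case hp =>
    rw [List.pairwise_map]
    apply (L_pairwise substrings keylist).imp
    intro a b h
    rw [Prod.Lex.lt_iff]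
    simpa using h

-- ===== VERDICT =====
theorem fetchKeys_py_spec : Claim_equal_fetchKeys_py := by
  intro substrings keylist _
  unfold Spec_fetchKeys_py fetchKeys_py fetchKeys_py_alt
  simp only [fetchKeys_inner, fetchKeys_outer, PySem.Set.update_nil_left,
    ← PySem.List.dedup_eq_ofList, core_eq]
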